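-- pv_equiv track=rewrite | github.com/DewPeaceTigers/AlgorithmStudy | weeks/week_31/PG_43238/jeongmin.py | solution
-- ===== SOURCE A (Python) =====
-- def solution(n, times):
--     answer = 0
--
--     INF = int(1e9 * 1e9)
--
--     start, end = 0, INF
--
--     while start<= end:
--         mid = (start + end) // 2
--
--         people = 0
--
--         # 누적합 구하기
--         for time in times:
--             people += mid//time
--
--         if people >= n:
--             answer = mid
--             end = mid - 1
--
--         else:
--             start = mid + 1
--
--     return answer
-- ===== SOURCE B (Python) =====
-- def solution(n, times):
--     # Group equal desk times once, then search recursively (no mutable answer).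
--     cnt = {}
--     for t in times:
--         cnt[t] = cnt.get(t, 0) + 1
--     items = list(cnt.items())
--
--     def served(mid):
--         total = 0
--         for t, c in items:
--             total += c * (mid // t)
--         return total
--
--     def go(lo, hi):
--         if lo > hi:
--             return None
--         mid = (lo + hi) // 2
--         if served(mid) >= n:
--             left = go(lo, mid - 1)
--             return mid if left is None else left
--         return go(mid + 1, hi)
--
--     r = go(0, 10 ** 18)
--     return 0 if r is None else r
-- ===== Notes on version B (the rewrite author's own statement) =====
-- stated objective: alternative
-- what changed: The imperative while-loop with a mutable 'answer' accumulator is replaced by a recursive Option-returning interval search, and the per-probe count sums over a dict of (time, multiplicity) pairs built once, so each distinct desk time is divided only once per probe instead of once per duplicate.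
import Mathlib
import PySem

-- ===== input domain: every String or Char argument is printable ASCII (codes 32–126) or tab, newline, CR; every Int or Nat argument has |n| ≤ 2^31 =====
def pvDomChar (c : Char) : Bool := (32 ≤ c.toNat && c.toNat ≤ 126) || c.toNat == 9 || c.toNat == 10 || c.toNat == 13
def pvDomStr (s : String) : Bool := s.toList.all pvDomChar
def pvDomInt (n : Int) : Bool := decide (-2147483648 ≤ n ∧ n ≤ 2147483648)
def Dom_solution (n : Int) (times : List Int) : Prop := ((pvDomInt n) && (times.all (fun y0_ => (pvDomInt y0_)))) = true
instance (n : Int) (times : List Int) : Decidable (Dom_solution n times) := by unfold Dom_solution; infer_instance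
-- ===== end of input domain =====

-- B replaces the imperative binary search (mutable 'answer') by a recursive Option-returning
-- interval search whose per-probe count folds over a (time, multiplicity) dict built once;
-- return values proved equal on all inputs without a zero desk time (there both raise).


-- ===== PORT A =====
-- people = sum of mid//time over times (the inner for-loop of A)
def peopleA (mid : Int) (times : List Int) : Int :=
  times.foldl (fun acc t => acc + PySem.Int.floordiv mid t) 0

-- the while start <= end loop, state (start, end, answer)
def loopA (n : Int) (times : List Int) (start e answer : Int) : Int :=
  if h : start ≤ e then
    if peopleA (PySem.Int.floordiv (start + e) 2) times ≥ n then
      loopA n times start (PySem.Int.floordiv (start + e) 2 - 1) (PySem.Int.floordiv (start + e) 2)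
    else
      loopA n times (PySem.Int.floordiv (start + e) 2 + 1) e answer
  else answer
termination_by (e + 1 - start).toNat
decreasing_by
  · have hb := PySem.Int.floordiv_two_mid_bounds h; omega
  · have hb := PySem.Int.floordiv_two_mid_bounds h; omega

def solution (n : Int) (times : List Int) : Int :=
  loopA n times 0 1000000000000000000 0

-- ===== PORT B =====
-- served(mid): fold over the (time, count) items of the dict
def servedB (mid : Int) (items : List (Int × Int)) : Int :=
  items.foldl (fun acc p => acc + p.2 * PySem.Int.floordiv mid p.1) 0

-- go(lo, hi): recursive search, None = no probe in [lo, hi] satisfied served >= n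
def goB (n : Int) (items : List (Int × Int)) (lo hi : Int) : Option Int :=
  if h : lo ≤ hi then
    if servedB (PySem.Int.floordiv (lo + hi) 2) items ≥ n then
      match goB n items lo (PySem.Int.floordiv (lo + hi) 2 - 1) with
      | some r => some r
      | none => some (PySem.Int.floordiv (lo + hi) 2)
    else goB n items (PySem.Int.floordiv (lo + hi) 2 + 1) hi
  else none
termination_by (hi + 1 - lo).toNat
decreasing_by
  · have hb := PySem.Int.floordiv_two_mid_bounds h; omega
  · have hb := PySem.Int.floordiv_two_mid_bounds h; omega

def solution_alt (n : Int) (times : List Int) : Int :=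
  let cnt : PySem.Dict Int Int :=
    times.foldl (fun d t => d.insert t (d.getD t 0 + 1)) PySem.Dict.empty
  match goB n cnt.items 0 1000000000000000000 with
  | some r => r
  | none => 0

-- ===== PRECONDITION & SPEC =====
-- Pre_ excludes inputs with a zero desk time: there both A and B raise ZeroDivisionError
-- on the very first probe (mid // 0), so A returns no value.
def Pre_solution (n : Int) (times : List Int) : Prop := (0 : Int) ∉ times
instance (n : Int) (times : List Int) : Decidable (Pre_solution n times) := by unfold Pre_solution; infer_instance

def pvWitness_solution : Int × List Int := (3, [1, 2])

def Spec_solution (n : Int) (times : List Int) (out : Int) : Prop := out = solution_alt n times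
instance (n : Int) (times : List Int) (out : Int) : Decidable (Spec_solution n times out) := by unfold Spec_solution; infer_instance

-- ===== CLAIM (what is proved, stated in full; the proofs are below) =====
def Claim_equal_solution : Prop := ∀ (n : Int) (times : List Int), Dom_solution n times → Pre_solution n times → Spec_solution n times (solution n times)

-- ===== LEMMAS AND PROOFS =====

-- sum over the distinct keys weighted by multiplicity = plain sum over the list
theorem sum_ofList_count_mul {xs : List Int} (g : Int → Int) :
    ((PySem.Set.ofList xs).map (fun k => ((xs.count k : Int)) * g k)).sum
      = (xs.map g).sum := by
  have hnd := PySem.Set.nodup_ofList (α := Int) xs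
  have hmem : ∀ y, y ∈ PySem.Set.ofList xs ↔ y ∈ xs := PySem.Set.mem_ofList xs
  -- pass through Finsets
  have h1 : ((PySem.Set.ofList xs).map (fun k => ((xs.count k : Int)) * g k)).sum
      = ∑ k ∈ (PySem.Set.ofList xs : List Int).toFinset, ((xs.count k : Int)) * g k := by
    rw [List.sum_toFinset _ hnd]
  have hfs : (PySem.Set.ofList xs : List Int).toFinset = xs.toFinset := by
    apply Finset.ext; intro a; simp [List.mem_toFinset, hmem]
  have h2 : (xs.map g).sum
      = ∑ k ∈ xs.toFinset, ((xs.count k : Int)) * g k := by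
    have := Finset.sum_multiset_map_count (xs : Multiset Int) g
    simpa [Multiset.coe_count, nsmul_eq_mul] using this
  rw [h1, hfs, ← h2]

-- the two per-probe counts agree
theorem served_eq_people (mid : Int) (times : List Int) :
    servedB mid (PySem.Dict.counter times).items = peopleA mid times := by
  unfold servedB peopleA
  rw [PySem.List.foldl_add (g := fun p : Int × Int => p.2 * PySem.Int.floordiv mid p.1),
      PySem.List.foldl_add (g := fun t => PySem.Int.floordiv mid t)]
  rw [PySem.Dict.items_counter]
  rw [List.map_map]
  have : ((fun p : Int × Int => p.2 * PySem.Int.floordiv mid p.1) ∘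
      fun k => (k, ((times.count k : Int))))
      = fun k => ((times.count k : Int)) * PySem.Int.floordiv mid k := rfl
  rw [this, sum_ofList_count_mul (fun k => PySem.Int.floordiv mid k)]

-- the two searches agree: A's loop with accumulator a = B's search, defaulted to a
theorem loopA_eq_goB (n : Int) (times : List Int) :
    ∀ (fuel : Nat) (s e a : Int), (e + 1 - s).toNat ≤ fuel →
      loopA n times s e a = (goB n (PySem.Dict.counter times).items s e).getD a := by
  intro fuel
  induction fuel with
  | zero =>
      intro s e a hf
      have hse : ¬ s ≤ e := by omega
      rw [loopA, goB]
      simp [hse]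
  | succ k ih =>
      intro s e a hf
      by_cases hse : s ≤ e
      · have hb := PySem.Int.floordiv_two_mid_bounds hse
        rw [loopA, goB]
        simp only [hse, dif_pos, served_eq_people]
        by_cases hp : peopleA (PySem.Int.floordiv (s + e) 2) times ≥ n
        · simp only [hp, if_pos]
          rw [ih s (PySem.Int.floordiv (s + e) 2 - 1) (PySem.Int.floordiv (s + e) 2) (by omega)]
          cases goB n (PySem.Dict.counter times).items s (PySem.Int.floordiv (s + e) 2 - 1) <;> simp
        · simp only [hp, if_neg, not_false_iff]
          exact ih (PySem.Int.floordiv (s + e) 2 + 1) e a (by omega)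
      · rw [loopA, goB]; simp [hse]

-- ===== VERDICT (by name: the statement is the Claim_ definition above) =====
theorem solution_spec : Claim_equal_solution := by
  intro n times _ _
  unfold Spec_solution solution solution_alt
  rw [PySem.Dict.foldl_insert_getD_add_one_eq_counter]
  rw [loopA_eq_goB n times (((1000000000000000000 : Int) + 1 - 0).toNat) 0 1000000000000000000 0 (by omega)]
  cases h : goB n (PySem.Dict.counter times).items 0 1000000000000000000 <;> simp [h]
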